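-- pv_equiv track=rewrite | github.com/zhaowj1107/CS5001 | Module2/doctest_sample.py | double_eights
-- ===== SOURCE A (Python) =====
-- def double_eights(n):
--     """Return true if n has two eights in a row.
--     >>> double_eights(8)
--     False
--     >>> double_eights(88)
--     True
--     >>> double_eights(2882)
--     True
--     >>> double_eights(880088)
--     True
--     >>> double_eights(12345)
--     False
--     >>> double_eights(80808080)
--     False
--     """
--     "*** YOUR CODE HERE ***"
--     while n >0:
--         if n % 10 ==8:
--             n = n // 10
--             if n % 10 ==8:
--                 return True
--             else:
--                 n = n // 10
--                 continue
--         else: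
--             n = n //10
--     return False
-- ===== SOURCE B (Python) =====
-- def double_eights(n):
--     return n > 0 and "88" in str(n)
-- ===== Notes on version B (the rewrite author's own statement) =====
-- stated objective: idiomatic
-- what changed: Replaces the arithmetic digit-extraction while-loop (with its skip-two-digits continue branch) by rendering the number as its decimal string and doing a substring membership test, with a positivity guard matching the loop's entry condition.
import Mathlib
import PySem

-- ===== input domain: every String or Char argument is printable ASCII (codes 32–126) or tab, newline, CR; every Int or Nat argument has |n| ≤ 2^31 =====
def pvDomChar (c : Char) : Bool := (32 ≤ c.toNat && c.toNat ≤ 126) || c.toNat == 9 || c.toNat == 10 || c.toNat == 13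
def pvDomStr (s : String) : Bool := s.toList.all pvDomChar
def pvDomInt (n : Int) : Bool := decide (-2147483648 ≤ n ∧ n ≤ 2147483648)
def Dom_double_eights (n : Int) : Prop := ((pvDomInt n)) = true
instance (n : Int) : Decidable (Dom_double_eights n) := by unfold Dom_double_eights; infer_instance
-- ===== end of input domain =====

-- B replaces A's arithmetic digit-extraction while-loop by a decimal-string substring test with a positivity guard (idiomatic).

-- ===== PORT A =====
-- A's while-loop, step for step: n%10==8 checks, n//10 steps, the skip-two continue branch.
def deLoop (n : Int) : Bool :=
  if 0 < n then
    if PySem.Int.mod n 10 = 8 then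
      if PySem.Int.mod (PySem.Int.floordiv n 10) 10 = 8 then true
      else deLoop (PySem.Int.floordiv (PySem.Int.floordiv n 10) 10)
    else deLoop (PySem.Int.floordiv n 10)
  else false
termination_by n.toNat
decreasing_by
  · rw [PySem.Int.floordiv_eq_ediv_of_pos (by norm_num : (0:Int) < 10),
      PySem.Int.floordiv_eq_ediv_of_pos (by norm_num : (0:Int) < 10)]
    omega
  · rw [PySem.Int.floordiv_eq_ediv_of_pos (by norm_num : (0:Int) < 10)]
    omega

def double_eights (n : Int) : Bool := deLoop n

-- ===== PORT B =====
-- Source B: return n > 0 and "88" in str(n)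
def double_eights_alt (n : Int) : Bool :=
  decide (n > 0) && PySem.Str.isIn "88" (PySem.Int.toStr n)

-- ===== PRECONDITION & SPEC =====
def Spec_double_eights (n : Int) (out : Bool) : Prop := out = double_eights_alt n
instance (n : Int) (out : Bool) : Decidable (Spec_double_eights n out) := by unfold Spec_double_eights; infer_instance

-- ===== CLAIM (what is proved, stated in full; the proofs are below) =====
def Claim_equal_double_eights : Prop := ∀ (n : Int), Dom_double_eights n → Spec_double_eights n (double_eights n)

-- ===== LEMMAS AND PROOFS =====

-- the decimal digits of m, least significant first, as characters
def revDigits (m : Nat) : List Char :=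
  Nat.digitChar (m % 10) :: (if 10 ≤ m then revDigits (m / 10) else [])
termination_by m
decreasing_by omega

-- A's loop restated on Nat
def loopN (m : Nat) : Bool :=
  if 0 < m then
    if m % 10 = 8 then
      if (m / 10) % 10 = 8 then true
      else loopN (m / 10 / 10)
    else loopN (m / 10)
  else false
termination_by m
decreasing_by all_goals omega

lemma deLoop_eq (m : Nat) : deLoop (m : Int) = loopN m := by
  induction m using Nat.strong_induction_on with
  | _ m ih =>
    rw [deLoop, loopN]
    simp only [show (10:Int) = ((10:Nat):Int) from rfl, PySem.Int.mod_natCast,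
      PySem.Int.floordiv_natCast]
    by_cases h0 : 0 < m
    · rw [if_pos (by exact_mod_cast h0), if_pos h0]
      by_cases h1 : m % 10 = 8
      · rw [if_pos (by exact_mod_cast congrArg (Nat.cast : Nat → Int) h1), if_pos h1]
        by_cases h2 : (m / 10) % 10 = 8
        · rw [if_pos (by exact_mod_cast congrArg (Nat.cast : Nat → Int) h2), if_pos h2]
        · rw [if_neg (by exact_mod_cast fun h => h2 (by exact_mod_cast h)),
            if_neg h2]
          exact ih _ (by omega)
      · rw [if_neg (by exact_mod_cast fun h => h1 (by exact_mod_cast h)), if_neg h1]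
        exact ih _ (by omega)
    · rw [if_neg (by exact_mod_cast h0), if_neg h0]

lemma toDigitsCore_eq (f : Nat) : ∀ (m : Nat) (acc : List Char), m < f →
    Nat.toDigitsCore 10 f m acc = (revDigits m).reverse ++ acc := by
  induction f with
  | zero => intro m acc h; omega
  | succ f ih =>
    intro m acc h
    rw [Nat.toDigitsCore, revDigits]
    by_cases h10 : 10 ≤ m
    · rw [if_neg (by omega), if_pos h10, ih (m / 10) _ (by omega)]
      simp
    · rw [if_pos (by omega), if_neg h10]
      simp [Nat.mod_eq_of_lt (by omega : m < 10)]

lemma toDigits_eq (m : Nat) : Nat.toDigits 10 m = (revDigits m).reverse :=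
  (toDigitsCore_eq (m + 1) m [] (by omega)).trans (by simp)

lemma digitChar_eq_eight (d : Nat) (hd : d < 10) : Nat.digitChar d = '8' ↔ d = 8 := by
  interval_cases d <;> simp [Nat.digitChar]

lemma infix88_cons (c : Char) (rest : List Char) (hc : c ≠ '8') :
    (['8', '8'] <:+: c :: rest) ↔ ['8', '8'] <:+: rest := by
  rw [List.infix_cons_iff, List.cons_prefix_cons]
  simp only [or_iff_right_iff_imp]
  rintro ⟨h8, -⟩
  exact absurd h8.symm hc

lemma infix88_nil_or_singleton (l : List Char) (hl : l.length ≤ 1) :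
    ¬ (['8', '8'] <:+: l) := fun h => by have := h.length_le; simp at this; omega

-- a number whose last digit is not 8 has "88" iff its quotient by 10 does (and it has ≥ 2 digits)
lemma infix88_step (k : Nat) (hk : k % 10 ≠ 8) :
    (['8', '8'] <:+: revDigits k) ↔ 10 ≤ k ∧ ['8', '8'] <:+: revDigits (k / 10) := by
  rw [revDigits, infix88_cons _ _ (fun h => hk ((digitChar_eq_eight _ (by omega)).mp h))]
  by_cases h10 : 10 ≤ k
  · simp [h10]
  · simp [h10, infix88_nil_or_singleton [] (by simp)]

lemma infix88_revDigits_small (k : Nat) (hk : k < 10) :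
    ¬ (['8', '8'] <:+: revDigits k) := by
  rw [revDigits, if_neg (by omega)]
  exact infix88_nil_or_singleton _ (by simp)

lemma loopN_iff (m : Nat) : loopN m = true ↔ ['8', '8'] <:+: revDigits m := by
  induction m using Nat.strong_induction_on with
  | _ m ih =>
    rw [loopN]
    by_cases h10 : 10 ≤ m
    · rw [if_pos (by omega)]
      by_cases h1 : m % 10 = 8
      · rw [if_pos h1, revDigits, if_pos h10,
          (digitChar_eq_eight (m % 10) (by omega)).mpr h1]
        by_cases h2 : (m / 10) % 10 = 8
        · rw [if_pos h2]
          constructor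
          · intro _
            exact (List.infix_cons_iff).mpr (Or.inl ((List.cons_prefix_cons).mpr
              ⟨rfl, by
                rw [revDigits, (digitChar_eq_eight _ (by omega)).mpr h2]
                exact (List.cons_prefix_cons).mpr ⟨rfl, by simp⟩⟩))
          · intro _; rfl
        · rw [if_neg h2, ih _ (by omega)]
          have hhead : ¬ (['8', '8'] <+: '8' :: revDigits (m / 10)) := by
            rw [List.cons_prefix_cons, revDigits, List.cons_prefix_cons]
            rintro ⟨-, h8, -⟩
            exact h2 ((digitChar_eq_eight _ (by omega)).mp h8.symm)
          rw [show (['8', '8'] <:+: '8' :: revDigits (m / 10)) ↔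
                ['8', '8'] <:+: revDigits (m / 10) by
              rw [List.infix_cons_iff]; simp [hhead],
            infix88_step (m / 10) h2]
          by_cases hq : 10 ≤ m / 10
          · simp [hq]
          · have hz : m / 10 / 10 = 0 := by omega
            rw [hz]
            simp [hq, infix88_revDigits_small 0 (by omega)]
      · rw [if_neg h1, ih _ (by omega), infix88_step m h1]
        simp [h10]
    · have hs := infix88_revDigits_small m (by omega)
      have l0 : loopN 0 = false := by rw [loopN]; simp
      by_cases h0 : 0 < m
      · have hdiv : m / 10 = 0 := by omega
        rw [if_pos h0, hdiv]
        split_ifs <;> simp_all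
      · rw [if_neg h0]
        simp [hs]

-- ===== VERDICT (by name: the statement is the Claim_ definition above) =====
lemma toStr_toList_pos (m : Nat) :
    (PySem.Int.toStr ((m : Nat) : Int)).toList = (revDigits m).reverse := by
  rw [PySem.Int.toList_toStr, PySem.Int.toChars, if_neg (by omega), Int.toNat_natCast,
    toDigits_eq]

theorem double_eights_spec : Claim_equal_double_eights := by
  intro n _
  unfold Spec_double_eights double_eights double_eights_alt
  by_cases hn : 0 < n
  · have hm : n = ((n.toNat : Nat) : Int) := by omega
    have hdec : (decide (((n.toNat : Nat) : Int) > 0)) = true := by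
      simp only [decide_eq_true_eq]
      omega
    have h88 : ("88" : String).toList = ['8', '8'] := rfl
    rw [hm, deLoop_eq, Bool.eq_iff_iff, hdec, Bool.true_and, loopN_iff,
      PySem.Str.isIn_iff_infix, toStr_toList_pos, h88]
    have hrev := List.reverse_infix (l₁ := (['8', '8'] : List Char))
      (l₂ := revDigits n.toNat)
    simp only [List.reverse_cons, List.reverse_nil, List.nil_append,
      List.singleton_append] at hrev
    exact hrev.symm
  · have hdec : (decide (n > 0)) = false := by
      simp only [decide_eq_false_iff_not]
      omega
    rw [deLoop, if_neg hn, hdec, Bool.false_and]
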